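-- pv_equiv track=rewrite | github.com/maashha/Nonogram-solver | Nonogram_project.py | calculate_intersections
-- ===== SOURCE A (Python) =====
-- def calculate_intersections(position_sets, block_lengths, total_length):
--     intersecting_clauses = []
--     for section_1 in range(len(position_sets)):
--         for section_2 in range(section_1 + 1, len(position_sets)):  # choose two sets of starting positions of the blocks
--             for first_position in range(len(position_sets[section_1])):
--                 # add elements of the first array in pairs with elements of the second, excluding their intersection
--                 for second_position in range(len(position_sets[section_2])):
--                     if abs((position_sets[section_1][first_position]) - (position_sets[section_2][second_position])) % total_length < sum(
--                             block_lengths[section_1:section_2]) + (section_2 - section_1) and abs(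
--                             (position_sets[section_1][first_position]) - (position_sets[section_2][second_position])) >= total_length:
--                         intersecting_clauses.append([-(position_sets[section_1][first_position]), -(position_sets[section_2][second_position])])
--                         if first_position >= 3:
--                             intersecting_clauses.append([-(position_sets[section_1][first_position]), -(position_sets[section_2][first_position - 3])])
--     return intersecting_clauses
-- ===== SOURCE B (Python) =====
-- def calculate_intersections(position_sets, block_lengths, total_length):
--     # Prefix sums of block_lengths so the slice-sum is O(1) per section pair.
--     prefix = [0]
--     for b in block_lengths:
--         prefix.append(prefix[-1] + b)
--     nb = len(block_lengths)
--     n = len(position_sets)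
--     clauses = []
--     for s1 in range(n):
--         row1 = position_sets[s1]
--         for s2 in range(s1 + 1, n):
--             row2 = position_sets[s2]
--             threshold = prefix[min(s2, nb)] - prefix[min(s1, nb)] + (s2 - s1)
--             for i, x in enumerate(row1):
--                 for y in row2:
--                     d = abs(x - y)
--                     if d % total_length < threshold and d >= total_length:
--                         clauses.append([-x, -y])
--                         if i >= 3:
--                             clauses.append([-x, -row2[i - 3]])
--     return clauses
-- ===== Notes on version B (the rewrite author's own statement) =====
-- stated objective: faster
-- what changed: B precomputes prefix sums of block_lengths once and hoists the per-pair threshold (slice sum) out of the two inner position loops, iterating rows directly with enumerate instead of re-slicing and re-summing block_lengths for every position pair.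
import Mathlib
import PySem

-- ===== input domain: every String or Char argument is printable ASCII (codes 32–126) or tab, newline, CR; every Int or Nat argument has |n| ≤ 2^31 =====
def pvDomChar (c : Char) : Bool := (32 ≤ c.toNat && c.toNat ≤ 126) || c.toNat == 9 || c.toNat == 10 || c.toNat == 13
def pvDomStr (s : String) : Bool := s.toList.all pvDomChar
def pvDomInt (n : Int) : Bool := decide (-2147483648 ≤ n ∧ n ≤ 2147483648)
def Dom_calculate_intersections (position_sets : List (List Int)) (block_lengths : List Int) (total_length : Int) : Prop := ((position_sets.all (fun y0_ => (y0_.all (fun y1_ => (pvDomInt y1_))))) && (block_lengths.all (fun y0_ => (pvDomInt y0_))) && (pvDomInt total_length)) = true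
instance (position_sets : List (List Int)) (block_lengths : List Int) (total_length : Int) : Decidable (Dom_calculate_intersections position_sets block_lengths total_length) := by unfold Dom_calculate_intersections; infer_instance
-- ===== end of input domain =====

-- B hoists the O(S) slice-sum out of the inner position loops via prefix sums of block_lengths
-- (O(S^2·P^2) instead of O(S^2·P^2·S)); same return value wherever A returns.

-- ===== PORT A =====
def calculate_intersections (position_sets : List (List Int)) (block_lengths : List Int) (total_length : Int) : List (List Int) :=
  (PySem.List.pyRange 0 (position_sets.length : Int) 1).foldl (fun acc1 s1 =>
    (PySem.List.pyRange (s1 + 1) (position_sets.length : Int) 1).foldl (fun acc2 s2 =>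
      (PySem.List.pyRange 0 ((PySem.List.pyGetD position_sets s1 []).length : Int) 1).foldl (fun acc3 i =>
        (PySem.List.pyRange 0 ((PySem.List.pyGetD position_sets s2 []).length : Int) 1).foldl (fun acc4 j =>
          let x := PySem.List.pyGetD (PySem.List.pyGetD position_sets s1 []) i 0
          let y := PySem.List.pyGetD (PySem.List.pyGetD position_sets s2 []) j 0
          if PySem.Int.mod |x - y| total_length <
               (PySem.List.slice block_lengths (some s1) (some s2)).sum + (s2 - s1) ∧
             total_length ≤ |x - y| then
            let acc5 := acc4 ++ [[-x, -y]]
            if 3 ≤ i then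
              acc5 ++ [[-x, -(PySem.List.pyGetD (PySem.List.pyGetD position_sets s2 []) (i - 3) 0)]]
            else acc5
          else acc4) acc3) acc2) acc1) []

-- ===== PORT B =====
def calculate_intersections_alt (position_sets : List (List Int)) (block_lengths : List Int) (total_length : Int) : List (List Int) :=
  let pre := block_lengths.foldl (fun acc b => acc ++ [PySem.List.pyGetD acc (-1) 0 + b]) [(0 : Int)]
  let nb := (block_lengths.length : Int)
  let n := (position_sets.length : Int)
  (PySem.List.pyRange 0 n 1).foldl (fun acc1 s1 =>
    let row1 := PySem.List.pyGetD position_sets s1 []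
    (PySem.List.pyRange (s1 + 1) n 1).foldl (fun acc2 s2 =>
      let row2 := PySem.List.pyGetD position_sets s2 []
      let threshold := PySem.List.pyGetD pre (min s2 nb) 0 - PySem.List.pyGetD pre (min s1 nb) 0 + (s2 - s1)
      (PySem.List.enumerate row1 0).foldl (fun acc3 p =>
        row2.foldl (fun acc4 y =>
          let d := |p.2 - y|
          if PySem.Int.mod d total_length < threshold ∧ total_length ≤ d then
            let acc5 := acc4 ++ [[-p.2, -y]]
            if 3 ≤ p.1 then acc5 ++ [[-p.2, -(PySem.List.pyGetD row2 (p.1 - 3) 0)]]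
            else acc5
          else acc4) acc3) acc2) acc1) []

-- ===== PRECONDITION & SPEC =====
-- Pre_ excludes exactly the inputs where the Python A raises: total_length = 0 with at least one
-- pair of nonempty position rows (ZeroDivisionError in the '%'), and inputs where the clause
-- condition fires for some first_position ≥ 3 whose index first_position-3 is out of range in the
-- second row (IndexError); B raises the same exceptions there.
def Pre_calculate_intersections (position_sets : List (List Int)) (block_lengths : List Int) (total_length : Int) : Prop :=
  (total_length ≠ 0 ∨
    ∀ s1 ∈ List.range position_sets.length, ∀ s2 ∈ List.range position_sets.length, s1 < s2 →
      position_sets.getD s1 [] = [] ∨ position_sets.getD s2 [] = []) ∧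
  (∀ s1 ∈ List.range position_sets.length, ∀ s2 ∈ List.range position_sets.length, s1 < s2 →
    ∀ i ∈ List.range (position_sets.getD s1 []).length, 3 ≤ i →
      ∀ j ∈ List.range (position_sets.getD s2 []).length,
        (PySem.Int.mod |(position_sets.getD s1 []).getD i 0 - (position_sets.getD s2 []).getD j 0| total_length <
           (PySem.List.slice block_lengths (some (s1 : Int)) (some (s2 : Int))).sum + ((s2 : Int) - (s1 : Int)) ∧
         total_length ≤ |(position_sets.getD s1 []).getD i 0 - (position_sets.getD s2 []).getD j 0|) →
        i - 3 < (position_sets.getD s2 []).length)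
instance (position_sets : List (List Int)) (block_lengths : List Int) (total_length : Int) : Decidable (Pre_calculate_intersections position_sets block_lengths total_length) := by unfold Pre_calculate_intersections; infer_instance

def pvWitness_calculate_intersections : List (List Int) × List Int × Int := ([[1, 2], [7, 9]], [2, 3], 5)

def Spec_calculate_intersections (position_sets : List (List Int)) (block_lengths : List Int) (total_length : Int) (out : List (List Int)) : Prop := out = calculate_intersections_alt position_sets block_lengths total_length
instance (position_sets : List (List Int)) (block_lengths : List Int) (total_length : Int) (out : List (List Int)) : Decidable (Spec_calculate_intersections position_sets block_lengths total_length out) := by unfold Spec_calculate_intersections; infer_instance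

-- ===== CLAIM (what is proved, stated in full; the proofs are below) =====
def Claim_equal_calculate_intersections : Prop := ∀ (position_sets : List (List Int)) (block_lengths : List Int) (total_length : Int), Dom_calculate_intersections position_sets block_lengths total_length → Pre_calculate_intersections position_sets block_lengths total_length → Spec_calculate_intersections position_sets block_lengths total_length (calculate_intersections position_sets block_lengths total_length)

-- ===== LEMMAS AND PROOFS =====

-- The prefix-sum list B builds, characterised in closed form.
lemma pref_aux (bl : List Int) : ∀ (acc : List Int) (c : Int),
    PySem.List.pyGetD acc (-1) 0 = c →
    bl.foldl (fun a b => a ++ [PySem.List.pyGetD a (-1) 0 + b]) acc =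
      acc ++ (List.range bl.length).map (fun k => c + (bl.take (k + 1)).sum) := by
  induction bl with
  | nil => intro acc c _; simp
  | cons b tl ih =>
    intro acc c hc
    have h1 : PySem.List.pyGetD (acc ++ [c + b]) (-1) 0 = c + b :=
      PySem.List.pyGetD_neg_one_append_singleton acc (c + b) 0
    simp only [List.foldl_cons, hc, ih (acc ++ [c + b]) (c + b) h1]
    rw [List.append_assoc]
    congr 1
    simp [List.range_succ_eq_map, List.map_map, Function.comp, add_assoc]

lemma pref_eq (bl : List Int) :
    bl.foldl (fun a b => a ++ [PySem.List.pyGetD a (-1) 0 + b]) [(0 : Int)] =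
      (List.range (bl.length + 1)).map (fun k => (bl.take k).sum) := by
  rw [pref_aux bl [(0 : Int)] 0 rfl]
  simp [List.range_succ_eq_map, List.map_map, Function.comp]

-- Sum of a take-prefix clamps at the list length.
lemma take_sum_min (bl : List Int) (m : Nat) :
    (bl.take (min m bl.length)).sum = (bl.take m).sum := by
  rcases le_total m bl.length with h | h
  · rw [min_eq_left h]
  · simp [min_eq_right h, List.take_of_length_le h]

-- The slice sum equals a difference of prefix sums.
lemma slice_sum_eq (bl : List Int) (a b : Nat) (hab : a ≤ b) :
    (PySem.List.slice bl (some (a : Int)) (some (b : Int))).sum =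
      (bl.take b).sum - (bl.take a).sum := by
  rw [PySem.List.slice_toNat bl (Int.natCast_nonneg a) (Int.natCast_nonneg b)]
  simp only [Int.toNat_natCast]
  have h : bl.take b = bl.take a ++ (bl.drop a).take (b - a) := by
    rw [← List.take_add, Nat.add_sub_cancel' hab]
  rw [h, List.sum_append]; omega

-- enumerate as an indexed map over range.
lemma enumerate_eq_map (xs : List Int) : ∀ (s : Nat),
    PySem.List.enumerate xs (s : Int) =
      (List.range xs.length).map (fun k => (((s + k : Nat) : Int), xs.getD k 0)) := by
  induction xs with
  | nil => intro s; simp [PySem.List.enumerate_nil]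
  | cons x xs ih =>
    intro s
    have hs : ((s : Int) + 1) = ((s + 1 : Nat) : Int) := by push_cast; ring
    rw [PySem.List.enumerate_cons, hs, ih (s + 1)]
    simp only [List.length_cons, List.range_succ_eq_map, List.map_cons, List.map_map]
    refine List.cons_eq_cons.mpr ⟨by simp, List.map_congr_left ?_⟩
    intro k _
    have h : s + 1 + k = s + (k + 1) := by omega
    simp [Function.comp, Nat.succ_eq_add_one, h]

lemma enumerate_eq_map_zero (xs : List Int) :
    PySem.List.enumerate xs 0 =
      (List.range xs.length).map (fun (k : Nat) => ((k : Int), xs.getD k 0)) := by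
  have h := enumerate_eq_map xs 0
  simpa using h

-- The core identity: for any fixed pair (s1, s2) in range, the two inner double loops agree.
lemma inner_eq (ps : List (List Int)) (bl : List Int) (tl : Int)
    (s1 s2 : Int) (hs1 : 0 ≤ s1) (hs12 : s1 < s2) (acc : List (List Int)) :
    (PySem.List.pyRange 0 ((PySem.List.pyGetD ps s1 []).length : Int) 1).foldl (fun acc3 i =>
      (PySem.List.pyRange 0 ((PySem.List.pyGetD ps s2 []).length : Int) 1).foldl (fun acc4 j =>
        let x := PySem.List.pyGetD (PySem.List.pyGetD ps s1 []) i 0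
        let y := PySem.List.pyGetD (PySem.List.pyGetD ps s2 []) j 0
        if PySem.Int.mod |x - y| tl <
             (PySem.List.slice bl (some s1) (some s2)).sum + (s2 - s1) ∧ tl ≤ |x - y| then
          let acc5 := acc4 ++ [[-x, -y]]
          if 3 ≤ i then
            acc5 ++ [[-x, -(PySem.List.pyGetD (PySem.List.pyGetD ps s2 []) (i - 3) 0)]]
          else acc5
        else acc4) acc3) acc
    =
    (PySem.List.enumerate (PySem.List.pyGetD ps s1 []) 0).foldl (fun acc3 p =>
      (PySem.List.pyGetD ps s2 []).foldl (fun acc4 y =>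
        let d := |p.2 - y|
        if PySem.Int.mod d tl <
             (PySem.List.pyGetD (bl.foldl (fun a b => a ++ [PySem.List.pyGetD a (-1) 0 + b]) [(0 : Int)])
                (min s2 (bl.length : Int)) 0 -
              PySem.List.pyGetD (bl.foldl (fun a b => a ++ [PySem.List.pyGetD a (-1) 0 + b]) [(0 : Int)])
                (min s1 (bl.length : Int)) 0 + (s2 - s1)) ∧ tl ≤ d then
          let acc5 := acc4 ++ [[-p.2, -y]]
          if 3 ≤ p.1 then acc5 ++ [[-p.2, -(PySem.List.pyGetD (PySem.List.pyGetD ps s2 []) (p.1 - 3) 0)]]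
          else acc5
        else acc4) acc3) acc := by
  have hs2 : 0 ≤ s2 := le_of_lt (lt_of_le_of_lt hs1 hs12)
  -- threshold = slice sum
  have hthr :
      PySem.List.pyGetD (bl.foldl (fun a b => a ++ [PySem.List.pyGetD a (-1) 0 + b]) [(0 : Int)])
          (min s2 (bl.length : Int)) 0 -
        PySem.List.pyGetD (bl.foldl (fun a b => a ++ [PySem.List.pyGetD a (-1) 0 + b]) [(0 : Int)])
          (min s1 (bl.length : Int)) 0
      = (PySem.List.slice bl (some s1) (some s2)).sum := by
    have hcast : ∀ t : Int, 0 ≤ t → min t (bl.length : Int) = ((min t.toNat bl.length : Nat) : Int) := by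
      intro t ht; omega
    have hget : ∀ m : Nat, m ≤ bl.length →
        PySem.List.pyGetD (bl.foldl (fun a b => a ++ [PySem.List.pyGetD a (-1) 0 + b]) [(0 : Int)])
          ((m : Nat) : Int) 0 = (bl.take m).sum := by
      intro m hm
      rw [PySem.List.pyGetD_natCast, pref_eq]
      exact PySem.List.getD_map_range _ _ _ _ (by omega)
    rw [hcast s1 hs1, hcast s2 hs2, hget _ (by omega), hget _ (by omega)]
    rw [take_sum_min, take_sum_min]
    have h1 : s1 = ((s1.toNat : Nat) : Int) := by omega
    have h2 : s2 = ((s2.toNat : Nat) : Int) := by omega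
    rw [h1, h2, slice_sum_eq bl s1.toNat s2.toNat (by omega)]
    simp only [Int.toNat_natCast]
  rw [hthr]
  -- enumerate ↔ index range over row1
  rw [enumerate_eq_map_zero (PySem.List.pyGetD ps s1 []),
      List.foldl_map,
      PySem.List.pyRange_zero_nat (PySem.List.pyGetD ps s1 []).length,
      List.foldl_map]
  -- both sides are now foldl over List.range row1.length; compare bodies pointwise
  apply PySem.List.foldl_congr_mem
  intro acc3 k _
  -- inner loop: index range over row2 ↔ direct foldl
  rw [← PySem.List.foldl_pyRange_zero_pyGetD' (PySem.List.pyGetD ps s2 []) 0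
        (fun acc4 y =>
          let d := |(PySem.List.pyGetD ps s1 []).getD k 0 - y|
          if PySem.Int.mod d tl < (PySem.List.slice bl (some s1) (some s2)).sum + (s2 - s1) ∧ tl ≤ d then
            let acc5 := acc4 ++ [[-(PySem.List.pyGetD ps s1 []).getD k 0, -y]]
            if 3 ≤ ((k : Nat) : Int) then
              acc5 ++ [[-(PySem.List.pyGetD ps s1 []).getD k 0,
                        -(PySem.List.pyGetD (PySem.List.pyGetD ps s2 []) (((k : Nat) : Int) - 3) 0)]]
            else acc5
          else acc4) acc3]
  simp [PySem.List.pyGetD_natCast]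

-- ===== VERDICT (by name: the statement is the Claim_ definition above) =====
theorem calculate_intersections_spec : Claim_equal_calculate_intersections := by
  intro ps bl tl _ _
  unfold Spec_calculate_intersections calculate_intersections calculate_intersections_alt
  apply PySem.List.foldl_congr_mem
  intro acc1 s1 hs1
  apply PySem.List.foldl_congr_mem
  intro acc2 s2 hs2
  rw [PySem.List.mem_pyRange_one] at hs1 hs2
  exact inner_eq ps bl tl s1 s2 hs1.1 (by omega) acc2
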